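-- pv_equiv track=rewrite | github.com/JoannaDrx/Catalog | main.py | _gen_repr_path
-- ===== SOURCE A (Python) =====
-- def _gen_repr_path(arr):
--     temp = arr[0]
--     root = ''
--     for char in temp:
--         if all(a.startswith(root + char) for a in arr):
--             root += char
--         else:
--             break
--     end = ''
--     for char in temp[::-1]:
--         if all(v.endswith(char + end) for v in arr):
--             end = char + end
--         else:
--             break
--     return root + '*' + end
-- ===== SOURCE B (Python) =====
-- def _gen_repr_path(arr):
--     first = arr[0]
--     p = len(first)
--     for s in arr:
--         k = 0
--         while k < p and k < len(s) and s[k] == first[k]: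
--             k += 1
--         p = k
--     q = len(first)
--     for s in arr:
--         k = 0
--         while k < q and k < len(s) and s[-1 - k] == first[-1 - k]:
--             k += 1
--         q = k
--     return first[:p] + '*' + first[len(first) - q:]
-- ===== Notes on version B (the rewrite author's own statement) =====
-- stated objective: alternative
-- what changed: Replaces A's per-character all(startswith/endswith) tests against a growing prefix/suffix string (rescanning every string from the start each step) with a single char-by-char common-prefix and common-suffix scan per string.
-- outside the precondition, e.g. on _gen_repr_path([]): A raises IndexError, B raises IndexError
import Mathlib
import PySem

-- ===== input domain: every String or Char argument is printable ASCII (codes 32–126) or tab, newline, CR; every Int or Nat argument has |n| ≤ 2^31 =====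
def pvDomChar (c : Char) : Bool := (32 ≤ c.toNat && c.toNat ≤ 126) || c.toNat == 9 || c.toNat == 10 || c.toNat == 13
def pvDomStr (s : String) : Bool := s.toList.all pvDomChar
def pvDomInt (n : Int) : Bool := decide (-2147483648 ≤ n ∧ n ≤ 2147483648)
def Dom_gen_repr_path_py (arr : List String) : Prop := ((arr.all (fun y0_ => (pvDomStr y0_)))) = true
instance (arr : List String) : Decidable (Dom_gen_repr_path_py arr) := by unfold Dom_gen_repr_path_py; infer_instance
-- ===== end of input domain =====

-- B replaces A's repeated startswith/endswith tests against a growing root/end by one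
-- char-by-char common-prefix/common-suffix scan per string; objective: alternative
-- (asymptotically fewer character comparisons; measured ~1.3x in a timing run, below the 1.5x bar).

-- ===== PORT A =====
-- for char in temp: if all(a.startswith(root + char) for a in arr): root += char else: break
def pvALoopRoot (arr : List String) : List Char → List Char → List Char
  | [], root => root
  | c :: rest, root =>
    if arr.all (fun a => PySem.Chars.startswith a.toList (root ++ [c])) then
      pvALoopRoot arr rest (root ++ [c])
    else root

-- for char in temp[::-1]: if all(v.endswith(char + end) for v in arr): end = char + end else: break
def pvALoopEnd (arr : List String) : List Char → List Char → List Char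
  | [], e => e
  | c :: rest, e =>
    if arr.all (fun v => PySem.Chars.endswith v.toList (c :: e)) then
      pvALoopEnd arr rest (c :: e)
    else e

def gen_repr_path_py (arr : List String) : String :=
  let temp := (arr.headD "").toList      -- temp = arr[0]; Pre_ excludes arr = [] (IndexError)
  let root := pvALoopRoot arr temp []
  let e := pvALoopEnd arr temp.reverse []   -- temp[::-1] is temp reversed
  String.ofList (root ++ ['*'] ++ e)

-- ===== PORT B =====
-- the while loop `k < p and k < len(s) and s[k] == first[k]: k += 1` run to completion:
-- k advances while both lists still have a char and the chars agree (first truncated to p)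
def pvMatchLen : List Char → List Char → Nat
  | a :: as_, b :: bs => if a == b then pvMatchLen as_ bs + 1 else 0
  | _, _ => 0

def gen_repr_path_py_alt (arr : List String) : String :=
  let first := (arr.headD "").toList     -- first = arr[0]; Pre_ excludes arr = [] (IndexError)
  let p := arr.foldl (fun p s => pvMatchLen (first.take p) s.toList) first.length
  -- s[-1-k] / first[-1-k] walk the strings from the back: compare the reversed lists
  let q := arr.foldl (fun q s => pvMatchLen (first.reverse.take q) s.toList.reverse) first.length
  String.ofList (first.take p ++ ['*'] ++ first.drop (first.length - q))

-- ===== PRECONDITION & SPEC =====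
-- A evaluates arr[0]: it raises IndexError exactly on the empty list, which Pre_ excludes.
def Pre_gen_repr_path_py (arr : List String) : Prop := arr ≠ []
instance (arr : List String) : Decidable (Pre_gen_repr_path_py arr) := by unfold Pre_gen_repr_path_py; infer_instance
def pvWitness_gen_repr_path_py : List String := (["abc", "abd"])
def Spec_gen_repr_path_py (arr : List String) (out : String) : Prop := out = gen_repr_path_py_alt arr
instance (arr : List String) (out : String) : Decidable (Spec_gen_repr_path_py arr out) := by unfold Spec_gen_repr_path_py; infer_instance

-- ===== CLAIM (what is proved, stated in full; the proofs are below) =====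
def Claim_equal_gen_repr_path_py : Prop := ∀ (arr : List String), Dom_gen_repr_path_py arr → Pre_gen_repr_path_py arr → Spec_gen_repr_path_py arr (gen_repr_path_py arr)

-- ===== LEMMAS AND PROOFS =====

theorem pvMatchLen_take (ts : List Char) : ∀ (p : Nat) (s : List Char),
    pvMatchLen (ts.take p) s = min p (pvMatchLen ts s) := by
  induction ts with
  | nil => intro p s; cases s <;> simp [pvMatchLen]
  | cons a as ih =>
    intro p s
    cases p with
    | zero => cases s <;> simp [pvMatchLen]
    | succ p =>
      cases s with
      | nil => simp [pvMatchLen]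
      | cons b bs =>
        by_cases h : a = b
        · simp [pvMatchLen, h, ih p bs]
        · simp [pvMatchLen, h]

theorem take_prefix_iff (ts : List Char) : ∀ (s : List Char) (k : Nat), k ≤ ts.length →
    ((ts.take k <+: s) ↔ k ≤ pvMatchLen ts s) := by
  induction ts with
  | nil =>
    intro s k hk
    have : k = 0 := Nat.le_zero.mp hk
    subst this; simp
  | cons a as ih =>
    intro s k hk
    cases k with
    | zero => simp
    | succ k =>
      cases s with
      | nil => simp [pvMatchLen]
      | cons b bs =>
        simp only [List.take_succ_cons, List.cons_prefix_cons, pvMatchLen]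
        by_cases hab : a = b
        · simp [hab, ih bs k (by simpa using hk)]
        · simp [hab]

theorem le_foldl_min (k : Nat) : ∀ (l : List Nat) (a : Nat),
    (k ≤ l.foldl min a ↔ k ≤ a ∧ ∀ x ∈ l, k ≤ x) := by
  intro l
  induction l with
  | nil => simp
  | cons x xs ih =>
    intro a
    simp only [List.foldl_cons, ih, List.mem_cons]
    constructor
    · rintro ⟨h1, h2⟩
      exact ⟨le_trans h1 (Nat.min_le_left _ _),
        fun y hy => hy.elim (fun e => e ▸ le_trans h1 (Nat.min_le_right _ _)) (h2 y)⟩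
    · rintro ⟨h1, h2⟩
      exact ⟨le_min h1 (h2 x (Or.inl rfl)), fun y hy => h2 y (Or.inr hy)⟩

-- B's fold over arr rewritten to a fold of `min` over the per-string common lengths
theorem foldB_eq_foldl_min (ts : List Char) (f : String → List Char) :
    ∀ (arr : List String) (a : Nat), a ≤ ts.length →
    arr.foldl (fun p s => pvMatchLen (ts.take p) (f s)) a
      = (arr.map (fun s => pvMatchLen ts (f s))).foldl min a := by
  intro arr
  induction arr with
  | nil => intro a _; simp
  | cons s rest ih =>
    intro a ha
    rw [List.foldl_cons, List.map_cons, List.foldl_cons, pvMatchLen_take]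
    exact ih _ (le_trans (Nat.min_le_left _ _) ha)

-- A's prefix loop computes ts.take P whenever the loop condition is "k ≤ P"
theorem loopRoot_eq (arr : List String) (ts : List Char) (P : Nat) (hP : P ≤ ts.length)
    (hiff : ∀ k, k ≤ ts.length →
      ((arr.all (fun a => PySem.Chars.startswith a.toList (ts.take k))) = true ↔ k ≤ P)) :
    ∀ (n i : Nat), n = ts.length - i → i ≤ P →
      pvALoopRoot arr (ts.drop i) (ts.take i) = ts.take P := by
  intro n
  induction n with
  | zero =>
    intro i hn hi
    have hi' : i = P := by omega
    have : ts.drop i = [] := by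
      apply List.drop_eq_nil_of_le; omega
    rw [this, hi']; rfl
  | succ n ih =>
    intro i hn hi
    have hlt : i < ts.length := by omega
    rw [List.drop_eq_getElem_cons hlt]
    show pvALoopRoot arr (ts[i] :: ts.drop (i+1)) (ts.take i) = ts.take P
    have hconcat : ts.take i ++ [ts[i]] = ts.take (i+1) := by
      rw [← List.take_concat_get hlt, List.concat_eq_append]
    rw [pvALoopRoot, hconcat]
    by_cases hc : i + 1 ≤ P
    · rw [if_pos ((hiff (i+1) (by omega)).mpr hc)]
      exact ih (i+1) (by omega) hc
    · rw [if_neg (by simpa [hiff (i+1) (by omega)] using hc)]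
      congr 1; omega

-- A's suffix loop over tr = ts.reverse computes (tr.take Q).reverse
theorem loopEnd_eq (arr : List String) (tr : List Char) (Q : Nat) (hQ : Q ≤ tr.length)
    (hiff : ∀ k, k ≤ tr.length →
      ((arr.all (fun v => PySem.Chars.endswith v.toList ((tr.take k).reverse))) = true ↔ k ≤ Q)) :
    ∀ (n j : Nat), n = tr.length - j → j ≤ Q →
      pvALoopEnd arr (tr.drop j) ((tr.take j).reverse) = (tr.take Q).reverse := by
  intro n
  induction n with
  | zero =>
    intro j hn hj
    have hj' : j = Q := by omega
    have : tr.drop j = [] := by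
      apply List.drop_eq_nil_of_le; omega
    rw [this, hj']; rfl
  | succ n ih =>
    intro j hn hj
    have hlt : j < tr.length := by omega
    rw [List.drop_eq_getElem_cons hlt]
    show pvALoopEnd arr (tr[j] :: tr.drop (j+1)) ((tr.take j).reverse) = (tr.take Q).reverse
    have hconcat : tr[j] :: (tr.take j).reverse = (tr.take (j+1)).reverse := by
      rw [← List.take_concat_get hlt, List.concat_eq_append, List.reverse_append]
      simp
    rw [pvALoopEnd, hconcat]
    by_cases hc : j + 1 ≤ Q
    · rw [if_pos ((hiff (j+1) (by omega)).mpr hc)]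
      exact ih (j+1) (by omega) hc
    · rw [if_neg (by simpa [hiff (j+1) (by omega)] using hc)]
      congr 2; omega

theorem gen_repr_path_py_spec : Claim_equal_gen_repr_path_py := by
  intro arr _ hpre
  unfold Spec_gen_repr_path_py gen_repr_path_py gen_repr_path_py_alt
  obtain ⟨t, rest, rfl⟩ : ∃ t rest, arr = t :: rest := by
    cases arr with
    | nil => exact absurd rfl hpre
    | cons t rest => exact ⟨t, rest, rfl⟩
  simp only [List.headD_cons]
  set arr := t :: rest with harr
  set ts := t.toList with hts
  set tr := ts.reverse with htr
  -- the two fold results of B, in `foldl min` form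
  set P := ((arr.map (fun s => pvMatchLen ts s.toList)).foldl min ts.length) with hPdef
  set Q := ((arr.map (fun s => pvMatchLen tr s.toList.reverse)).foldl min tr.length) with hQdef
  have hPchar : ∀ k, k ≤ P ↔ k ≤ ts.length ∧ ∀ s ∈ arr, k ≤ pvMatchLen ts s.toList := by
    intro k; rw [hPdef, le_foldl_min]; simp
  have hQchar : ∀ k, k ≤ Q ↔ k ≤ tr.length ∧ ∀ s ∈ arr, k ≤ pvMatchLen tr s.toList.reverse := by
    intro k; rw [hQdef, le_foldl_min]; simp
  have hP : P ≤ ts.length := ((hPchar P).mp le_rfl).1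
  have hQ : Q ≤ tr.length := ((hQchar Q).mp le_rfl).1
  have hlen : tr.length = ts.length := by simp [htr]
  -- B's folds
  have hBp : arr.foldl (fun p s => pvMatchLen (ts.take p) s.toList) ts.length = P := by
    rw [foldB_eq_foldl_min ts (fun s => s.toList) arr ts.length le_rfl]
  have hBq : arr.foldl (fun q s => pvMatchLen (tr.take q) s.toList.reverse) ts.length = Q := by
    rw [← hlen, foldB_eq_foldl_min tr (fun s => s.toList.reverse) arr tr.length le_rfl]
  -- A's loops
  have hAroot : pvALoopRoot arr ts [] = ts.take P := by
    have := loopRoot_eq arr ts P hP (fun k hk => by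
      rw [List.all_eq_true]
      constructor
      · intro h
        rw [hPchar]
        refine ⟨hk, fun s hs => ?_⟩
        rw [← take_prefix_iff ts s.toList k hk, ← PySem.Chars.startswith_iff]
        exact h s hs
      · intro h s hs
        rw [PySem.Chars.startswith_iff, take_prefix_iff ts s.toList k hk]
        exact ((hPchar k).mp h).2 s hs)
      (ts.length) 0 (by omega) (by omega)
    simpa using this
  have hend : ∀ (v : String) (k : Nat),
      (PySem.Chars.endswith v.toList ((tr.take k).reverse) = true) ↔ tr.take k <+: v.toList.reverse := by
    intro v k
    rw [PySem.Chars.endswith_iff, ← List.reverse_prefix, List.reverse_reverse]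
  have hAend : pvALoopEnd arr tr [] = (tr.take Q).reverse := by
    have := loopEnd_eq arr tr Q hQ (fun k hk => by
      rw [List.all_eq_true]
      constructor
      · intro h
        rw [hQchar]
        refine ⟨hk, fun s hs => ?_⟩
        rw [← take_prefix_iff tr s.toList.reverse k hk, ← hend]
        exact h s hs
      · intro h s hs
        rw [hend, take_prefix_iff tr s.toList.reverse k hk]
        exact ((hQchar k).mp h).2 s hs)
      (tr.length) 0 (by omega) (by omega)
    simpa using this
  rw [hAroot, hAend, hBp, hBq]
  congr 2
  rw [htr, List.take_reverse, List.reverse_reverse]
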